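-- pv_equiv track=rewrite | github.com/mozzarellatower/hytalemapconverter | converter.py | _parse_bitfield
-- ===== SOURCE A (Python) =====
-- def _parse_bitfield(data, bits, length):
--     values = []
--     for index in range(length):
--         bit_index = index * bits
--         value = 0
--         for bit in range(bits):
--             byte_index = (bit_index + bit) >> 3
--             if data[byte_index] & (1 << ((bit_index + bit) & 7)):
--                 value |= 1 << bit
--         values.append(value)
--     return values
-- ===== SOURCE B (Python) =====
-- def _parse_bitfield(data, bits, length):
--     # Assemble the used bytes into one big little-endian integer, then
--     # extract each value with a single shift-and-mask.
--     byte_count = (length * bits + 7) >> 3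
--     total = 0
--     for i in range(byte_count):
--         total |= (data[i] & 0xFF) << (8 * i)
--     return [(total >> (index * bits)) & ((1 << bits) - 1) for index in range(length)]
-- ===== Notes on version B (the rewrite author's own statement) =====
-- stated objective: alternative
-- what changed: A extracts each output value bit by bit with a nested per-bit loop over the packed bytes; B assembles the used bytes once into one big little-endian integer and extracts every value with a single shift-and-mask.
-- outside the precondition, e.g. on _parse_bitfield([], -1, 1): A returns [0], B raises ValueError; on _parse_bitfield([], -2, -1): A returns [], B raises IndexError
import Mathlib
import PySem

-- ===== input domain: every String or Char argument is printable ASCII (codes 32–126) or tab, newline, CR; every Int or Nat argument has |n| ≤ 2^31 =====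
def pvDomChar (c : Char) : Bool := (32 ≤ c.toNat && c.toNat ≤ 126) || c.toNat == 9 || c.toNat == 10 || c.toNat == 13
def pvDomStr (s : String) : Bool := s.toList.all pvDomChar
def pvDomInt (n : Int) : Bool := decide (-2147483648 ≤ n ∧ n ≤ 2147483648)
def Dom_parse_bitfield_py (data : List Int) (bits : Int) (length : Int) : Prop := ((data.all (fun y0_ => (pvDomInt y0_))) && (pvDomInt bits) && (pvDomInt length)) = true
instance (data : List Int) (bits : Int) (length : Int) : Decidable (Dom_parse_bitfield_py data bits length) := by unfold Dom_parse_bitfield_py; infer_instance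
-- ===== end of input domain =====

-- B replaces A's per-output-value inner bit loop by assembling the used bytes into one
-- big little-endian integer and extracting each value with a single shift-and-mask (objective: alternative).

-- ===== PORT A =====
def parse_bitfield_py (data : List Int) (bits : Int) (length : Int) : List Int :=
  (PySem.List.pyRange 0 length 1).foldl (fun values index =>
    let bit_index := index * bits
    let value := (PySem.List.pyRange 0 bits 1).foldl (fun value bit =>
      let byte_index := (bit_index + bit) >>> (3 : Nat)
      if PySem.Int.band (PySem.List.pyGetD data byte_index 0)
           (1 <<< (PySem.Int.band (bit_index + bit) 7).toNat) ≠ 0 then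
        PySem.Int.bor value (1 <<< bit.toNat)
      else value) 0
    values ++ [value]) []

-- ===== PORT B =====
def parse_bitfield_py_alt (data : List Int) (bits : Int) (length : Int) : List Int :=
  let byte_count := (length * bits + 7) >>> (3 : Nat)
  let total := (PySem.List.pyRange 0 byte_count 1).foldl (fun total i =>
    PySem.Int.bor total ((PySem.Int.band (PySem.List.pyGetD data i 0) 255) <<< (8 * i).toNat)) 0
  (PySem.List.pyRange 0 length 1).map (fun index =>
    PySem.Int.band (total >>> (index * bits).toNat) ((1 <<< bits.toNat) - 1))

-- ===== PRECONDITION & SPEC =====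
-- Pre_ excludes exactly the inputs where one of the programs raises: for bits < 0 with
-- length > 0 (and for bits < 0, length ≤ 0 with data too short for B's byte loop) A's empty
-- inner loop returns zero values while B raises (ValueError on the negative shift in the mask,
-- or IndexError in its byte loop); and when length*bits needs more bytes than data has, both
-- raise IndexError.
def Pre_parse_bitfield_py (data : List Int) (bits : Int) (length : Int) : Prop :=
  (0 ≤ bits ∧ length * bits ≤ 8 * data.length) ∨
  (length ≤ 0 ∧ PySem.Int.floordiv (length * bits + 7) 8 ≤ data.length)
instance (data : List Int) (bits : Int) (length : Int) : Decidable (Pre_parse_bitfield_py data bits length) := by unfold Pre_parse_bitfield_py; infer_instance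
def pvWitness_parse_bitfield_py : List Int × Int × Int := ([5, 200], 4, 3)

def Spec_parse_bitfield_py (data : List Int) (bits : Int) (length : Int) (out : List Int) : Prop := out = parse_bitfield_py_alt data bits length
instance (data : List Int) (bits : Int) (length : Int) (out : List Int) : Decidable (Spec_parse_bitfield_py data bits length out) := by unfold Spec_parse_bitfield_py; infer_instance

-- ===== CLAIM (what is proved, stated in full; the proofs are below) =====
def Claim_equal_parse_bitfield_py : Prop := ∀ (data : List Int) (bits : Int) (length : Int), Dom_parse_bitfield_py data bits length → Pre_parse_bitfield_py data bits length → Spec_parse_bitfield_py data bits length (parse_bitfield_py data bits length)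

-- ===== LEMMAS AND PROOFS =====

/-- Python's low byte `x & 255` of a list element, as a natural number. -/
def pvByte (data : List Int) (i : Nat) : Nat := (PySem.Int.band (data.getD i 0) 255).toNat

/-- Bit `p` of the packed bitfield (bit `p % 8` of byte `p / 8`). -/
def pvBit (data : List Int) (p : Nat) : Bool := (pvByte data (p / 8)).testBit (p % 8)

/-- Nat model of A's inner loop: value after reading `n` bits starting at bit `base`. -/
def pvG (data : List Int) (base : Nat) : Nat → Nat
  | 0 => 0
  | n + 1 => if pvBit data (base + n) then pvG data base n ||| (1 <<< n) else pvG data base n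

/-- Nat model of B's byte-assembly loop over the first `c` bytes. -/
def pvT (data : List Int) : Nat → Nat
  | 0 => 0
  | c + 1 => pvT data c ||| (pvByte data c <<< (8 * c))

theorem pvByte_lt (data : List Int) (i : Nat) : pvByte data i < 256 := by
  unfold pvByte
  rcases data.getD i 0 with m | m
  · simp only [PySem.Int.band]
    norm_num
    have h := Nat.and_le_right (n := m) (m := (255 : Int).toNat)
    have h2 : (255 : Int).toNat = 255 := rfl
    omega
  · simp only [PySem.Int.band]
    norm_num [Int.negSucc_not_nonneg]
    have h2 : (255 : Int).toNat = 255 := rfl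
    omega

/-- Key bit lemma: Python's test `x & (1 << k) != 0` reads bit `k` of the low byte `x & 255`
    whenever `k < 8`, for every integer `x` (including negatives, two's complement). -/
theorem pvKey (x : Int) (k : Nat) (hk : k < 8) :
    (PySem.Int.band x (1 <<< k) ≠ 0) ↔ (PySem.Int.band x 255).toNat.testBit k = true := by
  rw [show ((1 <<< k : Nat) : Int) = ((2 ^ k : Nat) : Int) from by rw [Nat.shiftLeft_eq, one_mul]]
  have h255 : (255 : Int) = ((255 : Nat) : Int) := by norm_num
  rcases x with m | m
  · rw [show (Int.ofNat m) = ((m : Nat) : Int) from rfl, h255,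
      PySem.Int.band_natCast, PySem.Int.band_natCast]
    rw [Int.toNat_natCast, Nat.testBit_land, Nat.and_two_pow]
    have h8 : (255 : Nat).testBit k = true := by
      rw [show (255 : Nat) = 2 ^ 8 - 1 by norm_num, Nat.testBit_two_pow_sub_one]
      simp [hk]
    rcases hb : m.testBit k with _ | _
    · simp
    · simp [h8]
  · have hneg : ¬ (0 : Int) ≤ Int.negSucc m := by simp [Int.negSucc_not_nonneg]
    have hm : (-(Int.negSucc m) - 1).toNat = m := by
      rw [Int.negSucc_eq]; omega
    simp only [PySem.Int.band, hneg, if_false,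
      if_pos (by positivity : (0:Int) ≤ ((2^k : Nat) : Int)),
      if_pos (by norm_num : (0:Int) ≤ (255:Int)), hm]
    rw [show ((255:Int)).toNat = 255 from rfl]
    have hand : (255 : Nat) &&& m = m % 256 := by
      rw [Nat.land_comm, show (255 : Nat) = 2 ^ 8 - 1 by norm_num, Nat.and_two_pow_sub_one_eq_mod]
    have hsub : (255 : Nat) - m % 256 = 2 ^ 8 - (m % 256 + 1) := by omega
    rw [Int.toNat_natCast, Int.toNat_natCast, hand, hsub,
      Nat.testBit_two_pow_sub_succ (by omega : m % 256 < 2 ^ 8),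
      show ((m % 256).testBit k) = m.testBit k from by
        rw [show (256 : Nat) = 2 ^ 8 by norm_num, Nat.testBit_mod_two_pow]; simp [hk]]
    have h2 : (2 : Nat) ^ k &&& m = 2 ^ k * (m.testBit k).toNat := Nat.two_pow_and m k
    have hpos : (0:Nat) < 2 ^ k := by positivity
    rcases hb : m.testBit k with _ | _
    · rw [h2, hb]
      have hne : ((2 ^ k : Nat) : Int) ≠ 0 := by positivity
      simp only [Bool.toNat_false, Nat.mul_zero, Nat.sub_zero, hk]
      simp [hne]
    · rw [h2, hb]
      simp [hk, hpos, Nat.mul_one]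

theorem pvG_testBit (data : List Int) (base : Nat) (n k : Nat) :
    (pvG data base n).testBit k = (decide (k < n) && pvBit data (base + k)) := by
  induction n with
  | zero => simp [pvG]
  | succ n ih =>
    have h2 : (1 <<< n : Nat) = 2 ^ n := by rw [Nat.shiftLeft_eq, one_mul]
    simp only [pvG]
    rcases Nat.lt_trichotomy k n with hk | hk | hk
    · have e1 : decide (k < n) = true := decide_eq_true (by omega)
      have e2 : decide (k < n + 1) = true := decide_eq_true (by omega)
      have e3 : decide (n = k) = false := decide_eq_false (by omega)
      have e4 : decide (k ≤ n) = true := decide_eq_true (by omega)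
      split_ifs with hb <;>
        simp [Nat.testBit_lor, ih, h2, Nat.testBit_two_pow, e1, e2, e3, e4]
    · subst hk
      have e1 : decide (k < k) = false := decide_eq_false (by omega)
      have e2 : decide (k < k + 1) = true := decide_eq_true (by omega)
      have e3 : decide (k = k) = true := decide_eq_true rfl
      split_ifs with hb
      · simp [Nat.testBit_lor, ih, h2, Nat.testBit_two_pow, e1, e2, e3, hb]
      · simp [ih, e1, e2, Bool.eq_false_iff.mpr hb]
    · have e1 : decide (k < n) = false := decide_eq_false (by omega)
      have e2 : decide (k < n + 1) = false := decide_eq_false (by omega)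
      have e3 : decide (n = k) = false := decide_eq_false (by omega)
      have e4 : decide (k ≤ n) = false := decide_eq_false (by omega)
      split_ifs with hb <;>
        simp [Nat.testBit_lor, ih, h2, Nat.testBit_two_pow, e1, e2, e3, e4]

theorem pvT_testBit (data : List Int) (c p : Nat) :
    (pvT data c).testBit p = (decide (p < 8 * c) && pvBit data p) := by
  induction c with
  | zero => simp [pvT]
  | succ c ih =>
    simp only [pvT]
    rw [Nat.testBit_lor, ih, Nat.testBit_shiftLeft]
    by_cases h1 : p < 8 * c
    · simp [h1, (by omega : p < 8 * (c + 1)), (by omega : ¬ 8 * c ≤ p)]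
    · by_cases h2 : p < 8 * (c + 1)
      · have hq : p / 8 = c := by omega
        have hr : p % 8 = p - 8 * c := by omega
        simp only [h1, decide_false, Bool.false_and, Bool.false_or, h2, decide_true,
          Bool.true_and, ge_iff_le, (by omega : 8 * c ≤ p), pvBit, hq, hr]
      · have hlt : pvByte data c < 2 ^ (p - 8 * c) := by
          calc pvByte data c < 256 := pvByte_lt data c
          _ = 2 ^ 8 := by norm_num
          _ ≤ 2 ^ (p - 8 * c) := Nat.pow_le_pow_right (by norm_num) (by omega)
        simp [h1, h2, Nat.testBit_lt_two_pow hlt]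

/-- A's inner loop over `range(bits)` computes `pvG` of the start bit. -/
theorem pvInnerA (data : List Int) (bi : Nat) (n : Nat) :
    (PySem.List.pyRange 0 (n : Int) 1).foldl (fun value bit =>
      if PySem.Int.band (PySem.List.pyGetD data ((((bi : Nat) : Int) + bit) >>> (3 : Nat)) 0)
           (1 <<< (PySem.Int.band (((bi : Nat) : Int) + bit) 7).toNat) ≠ 0 then
        PySem.Int.bor value (1 <<< bit.toNat)
      else value) 0 = ((pvG data bi n : Nat) : Int) := by
  induction n with
  | zero => simp [PySem.List.pyRange_one_eq_nil, pvG]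
  | succ n ih =>
    rw [show ((n + 1 : Nat) : Int) = (n : Int) + 1 from by omega,
      PySem.List.pyRange_one_succ_right (Int.natCast_nonneg n), List.foldl_append, ih]
    simp only [List.foldl_cons, List.foldl_nil]
    have hp : ((bi : Nat) : Int) + ((n : Nat) : Int) = (((bi + n : Nat) : Nat) : Int) := by omega
    have hshift : ((((bi + n : Nat) : Nat) : Int)) >>> (3 : Nat) = (((bi + n) / 8 : Nat) : Int) := by
      rw [← Int.natCast_shiftRight, Nat.shiftRight_eq_div_pow]
    have hband : (PySem.Int.band (((bi + n : Nat) : Nat) : Int) 7).toNat = (bi + n) % 8 := by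
      rw [show (7 : Int) = ((7 : Nat) : Int) by norm_num, PySem.Int.band_natCast, Int.toNat_natCast,
        show (7 : Nat) = 2 ^ 3 - 1 by norm_num, Nat.and_two_pow_sub_one_eq_mod]
    rw [hp, hshift, hband, PySem.List.pyGetD_natCast]
    by_cases hc : PySem.Int.band (data.getD ((bi + n) / 8) 0) (1 <<< ((bi + n) % 8)) ≠ 0
    · rw [if_pos hc]
      have hbit : pvBit data (bi + n) = true := by
        have := (pvKey (data.getD ((bi + n) / 8) 0) ((bi + n) % 8) (by omega)).mp hc
        simpa [pvBit, pvByte] using this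
      rw [Int.toNat_natCast, PySem.Int.bor_natCast]
      congr 1
      simp [pvG, hbit]
    · rw [if_neg hc]
      have hbit : ¬ pvBit data (bi + n) = true := by
        intro hh
        exact hc ((pvKey (data.getD ((bi + n) / 8) 0) ((bi + n) % 8) (by omega)).mpr
          (by simpa [pvBit, pvByte] using hh))
      congr 1
      simp [pvG, Bool.eq_false_iff.mpr hbit]

/-- B's byte-assembly loop over `range(byte_count)` computes `pvT`. -/
theorem pvTotalB (data : List Int) (c : Nat) :
    (PySem.List.pyRange 0 (c : Int) 1).foldl (fun total i =>
      PySem.Int.bor total ((PySem.Int.band (PySem.List.pyGetD data i 0) 255) <<< (8 * i).toNat)) 0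
    = ((pvT data c : Nat) : Int) := by
  induction c with
  | zero => simp [PySem.List.pyRange_one_eq_nil, pvT]
  | succ c ih =>
    rw [show ((c + 1 : Nat) : Int) = (c : Int) + 1 from by omega,
      PySem.List.pyRange_one_succ_right (Int.natCast_nonneg c), List.foldl_append, ih]
    simp only [List.foldl_cons, List.foldl_nil]
    have h8 : ((8 : Int) * ((c : Nat) : Int)).toNat = 8 * c := by
      rw [show (8 : Int) * ((c : Nat) : Int) = ((8 * c : Nat) : Int) from by omega,
        Int.toNat_natCast]
    have hbyte : PySem.Int.band (PySem.List.pyGetD data ((c : Nat) : Int) 0) 255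
        = ((pvByte data c : Nat) : Int) := by
      rw [PySem.List.pyGetD_natCast]
      unfold pvByte
      rw [Int.toNat_of_nonneg]
      rw [PySem.Int.band_comm]
      exact PySem.Int.band_nonneg_of_nonneg_left _ (by norm_num)
    rw [h8, hbyte, ← Int.natCast_shiftLeft, PySem.Int.bor_natCast]
    simp [pvT]

/-- The per-index agreement on the Nat side. -/
theorem pvPerIndex (data : List Int) (b n i c : Nat) (hi : i < n) (hc : n * b ≤ 8 * c) :
    pvG data (i * b) b = (pvT data c >>> (i * b)) &&& (2 ^ b - 1) := by
  apply Nat.eq_of_testBit_eq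
  intro k
  rw [pvG_testBit, Nat.testBit_land, Nat.testBit_shiftRight, pvT_testBit,
    Nat.testBit_two_pow_sub_one]
  by_cases hk : k < b
  · have hlt : i * b + k < 8 * c := by
      have h1 : i * b + k < (i + 1) * b := by
        rw [Nat.add_mul, one_mul]; omega
      have h2 : (i + 1) * b ≤ n * b := Nat.mul_le_mul_right b (by omega)
      omega
    simp [hk, hlt]
  · simp [hk]

-- ===== VERDICT (by name: the statement is the Claim_ definition above) =====
theorem parse_bitfield_py_spec : Claim_equal_parse_bitfield_py := by
  intro data bits length _ hpre
  unfold Spec_parse_bitfield_py parse_bitfield_py parse_bitfield_py_alt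
  dsimp only
  by_cases hlen : length ≤ 0
  · rw [PySem.List.pyRange_one_eq_nil hlen]
    simp
  · rw [Int.not_le] at hlen
    have hbits : 0 ≤ bits := by
      rcases hpre with ⟨hb, _⟩ | ⟨hl, _⟩
      · exact hb
      · omega
    obtain ⟨n, rfl⟩ : ∃ n : Nat, length = (n : Int) := ⟨length.toNat, (Int.toNat_of_nonneg (by omega)).symm⟩
    obtain ⟨b, rfl⟩ : ∃ b : Nat, bits = (b : Int) := ⟨bits.toNat, (Int.toNat_of_nonneg hbits).symm⟩
    -- the byte count as a natural number
    have hbc : ((n : Int) * (b : Int) + 7) >>> (3 : Nat) = (((n * b + 7) / 8 : Nat) : Int) := by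
      rw [show (n : Int) * (b : Int) + 7 = ((n * b + 7 : Nat) : Int) by push_cast; ring,
        ← Int.natCast_shiftRight, Nat.shiftRight_eq_div_pow]
    rw [hbc, pvTotalB]
    rw [PySem.List.foldl_append_singleton_eq_map
      (fun index => (PySem.List.pyRange 0 ((b : Nat) : Int) 1).foldl (fun value bit =>
        if PySem.Int.band (PySem.List.pyGetD data ((index * ((b : Nat) : Int) + bit) >>> (3 : Nat)) 0)
             (1 <<< (PySem.Int.band (index * ((b : Nat) : Int) + bit) 7).toNat) ≠ 0 then
          PySem.Int.bor value (1 <<< bit.toNat)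
        else value) 0)]
    rw [List.nil_append]
    apply List.map_congr_left
    intro index hmem
    rw [PySem.List.mem_pyRange_one] at hmem
    obtain ⟨i, rfl⟩ : ∃ i : Nat, index = (i : Int) := ⟨index.toNat, (Int.toNat_of_nonneg hmem.1).symm⟩
    have hi : i < n := by exact_mod_cast hmem.2
    have hib : (i : Int) * (b : Int) = ((i * b : Nat) : Int) := by push_cast; ring
    rw [hib, pvInnerA data (i * b) b]
    have htn : (((i * b : Nat) : Int)).toNat = i * b := Int.toNat_natCast _
    have hbn : (((b : Nat) : Int)).toNat = b := Int.toNat_natCast _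
    have hmask : (((1 <<< b : Nat) : Nat) : Int) - 1 = ((2 ^ b - 1 : Nat) : Int) := by
      rw [Nat.shiftLeft_eq, one_mul]
      have h1 : (1 : Nat) ≤ 2 ^ b := Nat.one_le_two_pow
      push_cast [h1]
      ring
    rw [htn, hbn, hmask, ← Int.natCast_shiftRight, PySem.Int.band_natCast]
    exact congrArg _ (pvPerIndex data b n i ((n * b + 7) / 8) hi (by omega))
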